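-- pv_equiv track=rewrite | github.com/VincentCadicamo/KnightHacksVIII | src/VRP.py | combine_routes_with_single_depot_separator
-- ===== SOURCE A (Python) =====
-- def combine_routes_with_single_depot_separator(routes, depot=0, keep_final_depot=True):
--     combo = []
--     for i, r in enumerate(routes):
--         if i < len(routes) - 1:
--             combo.extend(r[:-1])  # drop trailing depot between sorties
--         else:
--             combo.extend(r if keep_final_depot else r[:-1])
--     return combo
-- ===== SOURCE B (Python) =====
-- def combine_routes_with_single_depot_separator(routes, depot=0, keep_final_depot=True):
--     # Flatten everything, recording the end position of each non-empty route,
--     # then delete the marked positions (un-marking the last one when kept).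
--     flat = []
--     cuts = []
--     for r in routes:
--         flat.extend(r)
--         if r:
--             cuts.append(len(flat) - 1)
--     if keep_final_depot and routes and routes[-1]:
--         cuts.pop()
--     cutset = set(cuts)
--     return [x for j, x in enumerate(flat) if j not in cutset]
-- ===== Notes on version B (the rewrite author's own statement) =====
-- stated objective: alternative
-- what changed: Instead of trimming each route while concatenating, B flattens all routes into one list while recording the flat end-position of every non-empty route, un-marks the last position when the final depot is kept, and then deletes the marked positions in a final filtering pass.
import Mathlib
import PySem

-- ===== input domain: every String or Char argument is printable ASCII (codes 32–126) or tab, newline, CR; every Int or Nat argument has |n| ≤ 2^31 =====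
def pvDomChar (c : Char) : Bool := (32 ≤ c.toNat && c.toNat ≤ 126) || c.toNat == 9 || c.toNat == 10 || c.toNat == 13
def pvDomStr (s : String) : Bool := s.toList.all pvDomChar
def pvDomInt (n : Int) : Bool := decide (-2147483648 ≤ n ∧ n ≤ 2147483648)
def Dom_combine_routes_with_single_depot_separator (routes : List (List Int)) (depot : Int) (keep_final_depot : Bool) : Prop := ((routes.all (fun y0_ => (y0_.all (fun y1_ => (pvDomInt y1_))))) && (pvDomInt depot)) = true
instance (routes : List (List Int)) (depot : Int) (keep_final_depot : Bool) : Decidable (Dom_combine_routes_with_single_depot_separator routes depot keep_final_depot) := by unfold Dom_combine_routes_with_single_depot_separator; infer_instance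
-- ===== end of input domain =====

-- ===== PORT A =====
-- B replaces A's trim-each-segment loop by a flatten-then-delete-marked-positions algorithm (alternative, same cost).
def combine_routes_with_single_depot_separator (routes : List (List Int)) (depot : Int) (keep_final_depot : Bool) : List Int :=
  (PySem.List.enumerate routes 0).foldl
    (fun combo ir =>
      if ir.1 < (routes.length : Int) - 1 then combo ++ ir.2.dropLast
      else combo ++ (if keep_final_depot then ir.2 else ir.2.dropLast)) []

-- ===== PORT B =====
def combine_routes_with_single_depot_separator_alt (routes : List (List Int)) (depot : Int) (keep_final_depot : Bool) : List Int :=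
  let st := routes.foldl
    (fun (st : List Int × List Int) r =>
      let flat := st.1 ++ r
      let cuts := if r.isEmpty then st.2 else st.2 ++ [(flat.length : Int) - 1]
      (flat, cuts)) ([], [])
  let cuts := if keep_final_depot && !routes.isEmpty && !(routes.getLastD []).isEmpty
    then st.2.dropLast else st.2
  let cutset := PySem.Set.ofList cuts
  ((PySem.List.enumerate st.1 0).filter (fun p => !(cutset.contains p.1))).map Prod.snd

-- ===== PRECONDITION & SPEC =====
def Spec_combine_routes_with_single_depot_separator (routes : List (List Int)) (depot : Int) (keep_final_depot : Bool) (out : List Int) : Prop := out = combine_routes_with_single_depot_separator_alt routes depot keep_final_depot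
instance (routes : List (List Int)) (depot : Int) (keep_final_depot : Bool) (out : List Int) : Decidable (Spec_combine_routes_with_single_depot_separator routes depot keep_final_depot out) := by unfold Spec_combine_routes_with_single_depot_separator; infer_instance

-- ===== CLAIM (what is proved, stated in full; the proofs are below) =====
def Claim_equal_combine_routes_with_single_depot_separator : Prop := ∀ (routes : List (List Int)) (depot : Int) (keep_final_depot : Bool), Dom_combine_routes_with_single_depot_separator routes depot keep_final_depot → Spec_combine_routes_with_single_depot_separator routes depot keep_final_depot (combine_routes_with_single_depot_separator routes depot keep_final_depot)

-- ===== LEMMAS AND PROOFS =====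

-- A's loop body, with the append factored out of the branch
def pvBody (n : Int) (keep : Bool) (ir : Int × List Int) : List Int :=
  if ir.1 < n - 1 then ir.2.dropLast else (if keep then ir.2 else ir.2.dropLast)

theorem pvA_eq_flatMap (routes : List (List Int)) (depot : Int) (keep : Bool) :
    combine_routes_with_single_depot_separator routes depot keep =
      (PySem.List.enumerate routes 0).flatMap (pvBody routes.length keep) := by
  unfold combine_routes_with_single_depot_separator
  have hfun : (fun (combo : List Int) (ir : Int × List Int) =>
      if ir.1 < (routes.length : Int) - 1 then combo ++ ir.2.dropLast
      else combo ++ (if keep then ir.2 else ir.2.dropLast)) =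
      (fun combo ir => combo ++ pvBody routes.length keep ir) := by
    funext c ir; unfold pvBody; split <;> rfl
  rw [hfun, PySem.List.foldl_append_eq_flatMap]
  simp

theorem pvEnum_flatMap_dropLast (l : List (List Int)) (s : Int) :
    (PySem.List.enumerate l s).flatMap (fun ir => ir.2.dropLast) = l.flatMap List.dropLast := by
  induction l generalizing s with
  | nil => simp [PySem.List.enumerate_nil]
  | cons x xs ih => simp [PySem.List.enumerate_cons, ih]

theorem pvA_false (routes : List (List Int)) (depot : Int) :
    combine_routes_with_single_depot_separator routes depot false =
      routes.flatMap List.dropLast := by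
  rw [pvA_eq_flatMap]
  have : pvBody routes.length false = fun ir => ir.2.dropLast := by
    funext ir; unfold pvBody; split <;> rfl
  rw [this, pvEnum_flatMap_dropLast]

theorem pvA_true (init : List (List Int)) (last : List Int) (depot : Int) :
    combine_routes_with_single_depot_separator (init ++ [last]) depot true =
      init.flatMap List.dropLast ++ last := by
  rw [pvA_eq_flatMap]
  rw [PySem.List.enumerate_append, List.flatMap_append]
  have h1 : (PySem.List.enumerate init 0).flatMap (pvBody (init ++ [last]).length true) =
      init.flatMap List.dropLast := by
    rw [← pvEnum_flatMap_dropLast init 0]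
    unfold List.flatMap
    congr 1
    apply List.map_congr_left
    intro p hp
    rcases (PySem.List.mem_enumerate_iff _ _ _).1 hp with ⟨k, hk, rfl⟩
    unfold pvBody
    simp only [List.length_append, List.length_cons, List.length_nil]
    rw [if_pos (by push_cast; omega)]
  have h2 : pvBody ((init ++ [last]).length) true (0 + init.length, last) = last := by
    unfold pvBody
    simp only [List.length_append, List.length_cons, List.length_nil]
    rw [if_neg (by push_cast; omega)]
    rfl
  rw [h1]
  simp only [PySem.List.enumerate_cons, PySem.List.enumerate_nil, List.flatMap_cons,
    List.flatMap_nil, List.append_nil, h2]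

-- the end position (last index in the flattened list) of each non-empty route, starting at offset s
def pvCutPos : List (List Int) → Int → List Int
  | [], _ => []
  | r :: rs, s =>
      (if r.isEmpty then ([] : List Int) else [s + r.length - 1]) ++ pvCutPos rs (s + r.length)

theorem pvCutPos_bounds (rs : List (List Int)) (s : Int) (x : Int) (hx : x ∈ pvCutPos rs s) :
    s ≤ x ∧ x < s + (rs.flatten.length : Int) := by
  induction rs generalizing s with
  | nil => simp [pvCutPos] at hx
  | cons r rs ih =>
    rw [List.flatten_cons, List.length_append]
    simp only [pvCutPos, List.mem_append] at hx
    rcases hx with hx | hx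
    · have hne : r.isEmpty = false := by
        cases h : r.isEmpty
        · rfl
        · rw [h] at hx; simp at hx
      simp only [hne, Bool.false_eq_true, if_false, List.mem_singleton] at hx
      have h1 : 1 ≤ r.length := by
        cases r
        · simp at hne
        · simp
      subst hx
      push_cast
      omega
    · have := ih (s + r.length) hx
      push_cast at this ⊢
      omega

theorem pvCutPos_append (a b : List (List Int)) (s : Int) :
    pvCutPos (a ++ b) s = pvCutPos a s ++ pvCutPos b (s + (a.flatten.length : Int)) := by
  induction a generalizing s with
  | nil => simp [pvCutPos]
  | cons r rs ih =>
    simp only [List.cons_append, pvCutPos, ih, List.flatten_cons, List.length_append]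
    rw [← List.append_assoc]
    congr 2
    push_cast
    ring

-- B's accumulation loop computes (prefix ++ flatten, prior cuts ++ cut positions)
theorem pvFold_char (rs : List (List Int)) (f0 c0 : List Int) :
    rs.foldl (fun (st : List Int × List Int) r =>
        let flat := st.1 ++ r
        let cuts := if r.isEmpty then st.2 else st.2 ++ [(flat.length : Int) - 1]
        (flat, cuts)) (f0, c0)
      = (f0 ++ rs.flatten, c0 ++ pvCutPos rs (f0.length : Int)) := by
  induction rs generalizing f0 c0 with
  | nil => simp [pvCutPos]
  | cons r rs ih =>
    simp only [List.foldl_cons, ih]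
    rcases hr : r.isEmpty with _ | _
    · simp only [pvCutPos, hr, Bool.false_eq_true, if_false, Prod.mk.injEq]
      refine ⟨by simp, ?_⟩
      rw [← List.append_assoc]
      congr 2
      · congr 1; simp
      · congr 1; push_cast; simp
    · have hre : r = [] := List.isEmpty_iff.mp hr
      subst hre
      simp [pvCutPos]

theorem pvContains_ofList (cuts : List Int) (x : Int) :
    (PySem.Set.ofList cuts).contains x = cuts.contains x := by
  by_cases h : x ∈ cuts <;>
    simp [PySem.Set.contains_eq_listContains, PySem.Set.mem_ofList, h]

-- a block none of whose indices are cut positions is kept whole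
theorem pvFilter_keep (l : List Int) (s : Int) (cuts : List Int)
    (h : ∀ k : Nat, k < l.length → (s + (k : Int)) ∉ cuts) :
    ((PySem.List.enumerate l s).filter (fun p => !(cuts.contains p.1))).map Prod.snd = l := by
  have : (PySem.List.enumerate l s).filter (fun p => !(cuts.contains p.1)) =
      PySem.List.enumerate l s := by
    apply List.filter_eq_self.mpr
    intro p hp
    rcases (PySem.List.mem_enumerate_iff _ _ _).1 hp with ⟨k, hk, rfl⟩
    simpa using h k hk
  rw [this, PySem.List.map_snd_enumerate]

-- master lemma: filtering out exactly the cut positions trims each segment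
theorem pvFilter_cut (rs : List (List Int)) (s : Int) (cuts : List Int)
    (h1 : ∀ x ∈ cuts, x ∈ pvCutPos rs s ∨ x < s)
    (h2 : ∀ x ∈ pvCutPos rs s, x ∈ cuts) :
    ((PySem.List.enumerate rs.flatten s).filter (fun p => !(cuts.contains p.1))).map Prod.snd
      = rs.flatMap List.dropLast := by
  induction rs generalizing s cuts with
  | nil => simp [PySem.List.enumerate_nil]
  | cons r rs ih =>
    simp only [List.flatten_cons, PySem.List.enumerate_append, List.filter_append,
      List.map_append, List.flatMap_cons]
    have hsub : ∀ x ∈ pvCutPos rs (s + (r.length : Int)), x ∈ pvCutPos (r :: rs) s := by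
      intro x hx; simp [pvCutPos, hx]
    congr 1
    · -- segment r
      rcases hr : r.isEmpty with _ | _
      · -- r nonempty
        have hne : r ≠ [] := by
          intro he; subst he; simp at hr
        have hlen : 1 ≤ r.length := by
          cases r with | nil => exact absurd rfl hne | cons a t => simp
        have hmem : s + (r.length : Int) - 1 ∈ cuts := by
          apply h2; simp [pvCutPos, hr]
        conv_lhs => rw [← List.dropLast_append_getLast hne]
        rw [PySem.List.enumerate_append, List.filter_append, List.map_append]
        have hkeep :
            ((PySem.List.enumerate r.dropLast s).filter
              (fun p => !(cuts.contains p.1))).map Prod.snd = r.dropLast := by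
          apply pvFilter_keep
          intro k hk hmem'
          rcases h1 _ hmem' with hx | hx
          · simp only [pvCutPos, hr, Bool.false_eq_true, if_false, List.mem_append,
              List.mem_singleton] at hx
            rcases hx with hx | hx
            · have hlen : 1 ≤ r.length := by
                cases r
                · simp at hr
                · simp
              rw [List.length_dropLast] at hk; omega
            · have := (pvCutPos_bounds _ _ _ hx).1
              rw [List.length_dropLast] at hk; omega
          · omega
        rw [hkeep]
        have hdrop :
            ((PySem.List.enumerate [r.getLast hne] (s + (r.dropLast.length : Int))).filter
              (fun p => !(cuts.contains p.1))).map Prod.snd = [] := by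
          simp only [PySem.List.enumerate_cons, PySem.List.enumerate_nil]
          have hpos : s + (r.dropLast.length : Int) = s + (r.length : Int) - 1 := by
            rw [List.length_dropLast]; push_cast; omega
          rw [hpos]
          simp [List.filter, hmem]
        rw [hdrop, List.append_nil]
      · have hre : r = [] := List.isEmpty_iff.mp hr
        subst hre
        simp [PySem.List.enumerate_nil]
    · -- remaining segments
      apply ih
      · intro x hx
        rcases h1 x hx with hx' | hx'
        · simp only [pvCutPos, List.mem_append] at hx'
          rcases hx' with hx' | hx'
          · right
            rcases hr : r.isEmpty with _ | _
            · rw [if_neg (by simp [hr])] at hx'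
              simp only [List.mem_singleton] at hx'
              have hne : r ≠ [] := by intro he; subst he; simp at hr
              have hlen : 1 ≤ r.length := by
                cases r with | nil => exact absurd rfl hne | cons a t => simp
              omega
            · rw [if_pos hr] at hx'; simp at hx'
          · left; exact hx'
        · right
          have : (0 : Int) ≤ r.length := by positivity
          omega
      · intro x hx
        exact h2 x (hsub x hx)

-- the cut list B ends up filtering with, per case
def pvCutsOf (routes : List (List Int)) (keep : Bool) : List Int :=
  if keep && !routes.isEmpty && !(routes.getLastD []).isEmpty
  then (pvCutPos routes 0).dropLast else pvCutPos routes 0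

theorem pvAlt_eq (routes : List (List Int)) (depot : Int) (keep : Bool) :
    combine_routes_with_single_depot_separator_alt routes depot keep =
      ((PySem.List.enumerate routes.flatten 0).filter
        (fun p => !((pvCutsOf routes keep).contains p.1))).map Prod.snd := by
  unfold combine_routes_with_single_depot_separator_alt
  simp only [pvFold_char, List.nil_append, List.length_nil, Nat.cast_zero]
  have hfun : ∀ C : List Int, (fun p : Int × Int => !((PySem.Set.ofList C).contains p.1))
      = fun p : Int × Int => !(C.contains p.1) := by
    intro C; funext p; rw [pvContains_ofList]
  rw [hfun]
  rfl

theorem pvCutsOf_false (routes : List (List Int)) :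
    pvCutsOf routes false = pvCutPos routes 0 := by
  simp [pvCutsOf]

theorem pvCutsOf_pop (init : List (List Int)) (last : List Int) (hl : last.isEmpty = false) :
    pvCutsOf (init ++ [last]) true = pvCutPos init 0 := by
  unfold pvCutsOf
  rw [if_pos (by simp [hl])]
  rw [pvCutPos_append]
  simp only [pvCutPos, hl, Bool.false_eq_true, if_false, List.append_nil]
  exact List.dropLast_concat

theorem pvCutsOf_empty_last (init : List (List Int)) :
    pvCutsOf (init ++ [[]]) true = pvCutPos (init ++ [[]]) 0 := by
  simp [pvCutsOf]

theorem combine_key (routes : List (List Int)) (depot : Int) (keep : Bool) :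
    combine_routes_with_single_depot_separator routes depot keep =
      combine_routes_with_single_depot_separator_alt routes depot keep := by
  cases keep with
  | false =>
    rw [pvA_false, pvAlt_eq, pvCutsOf_false,
      pvFilter_cut routes 0 _ (fun x hx => Or.inl hx) (fun x hx => hx)]
  | true =>
    induction routes using List.reverseRecOn with
    | nil =>
      rw [pvAlt_eq]
      simp [combine_routes_with_single_depot_separator, PySem.List.enumerate_nil]
    | append_singleton init last _ =>
      rw [pvA_true, pvAlt_eq]
      rcases hl : last.isEmpty with _ | _
      · rw [pvCutsOf_pop init last hl]
        have hfl : (init ++ [last]).flatten = init.flatten ++ last := by simp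
        rw [hfl, PySem.List.enumerate_append, List.filter_append, List.map_append]
        rw [pvFilter_cut init 0 _ (fun x hx => Or.inl hx) (fun x hx => hx)]
        congr 1
        apply (pvFilter_keep _ _ _ _).symm
        intro k hk hmem
        have hb := pvCutPos_bounds _ _ _ hmem
        omega
      · have hle : last = [] := List.isEmpty_iff.mp hl
        subst hle
        rw [pvCutsOf_empty_last]
        rw [pvFilter_cut (init ++ [[]]) 0 _ (fun x hx => Or.inl hx) (fun x hx => hx)]
        simp

-- ===== VERDICT (by name: the statement is the Claim_ definition above) =====
theorem combine_routes_with_single_depot_separator_spec : Claim_equal_combine_routes_with_single_depot_separator := by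
  intro routes depot keep _
  exact combine_key routes depot keep
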